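-- pv_equiv track=rewrite | github.com/jyshin0926/Algorithm | programmers/0617_BF_모의고사.py | solution
-- ===== SOURCE A (Python) =====
-- def solution(answers):
--     ans = []
--     cnt = [0,0,0]
--     supo1 = []
--     supo2 = []
--     supo3 = []
--     tmp1 = [i for i in range(1, 6, 1)]  # [1,2,3,4,5]   # 0~4
--     tmp2 = [2,1,2,3,2,4,2,5]    # 0~7
--     tmp3 = [3,3,1,1,2,2,4,4,5,5]    # 0 ~ 9
--     for i in range(len(answers)):
--         supo1.append(tmp1[i % 5])
--         supo2.append(tmp2[i % 8])
--         supo3.append(tmp3[i % 10])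
--         if supo1[i] == answers[i]:
--             cnt[0] += 1
--         if supo2[i] == answers[i]:
--             cnt[1] += 1
--         if supo3[i] == answers[i]:
--             cnt[2] += 1
--
--     for i in range(len(cnt)):
--         if cnt[i] == max(cnt):
--             ans.append(i+1)
--     return ans
-- ===== SOURCE B (Python) =====
-- def solution(answers):
--     # Bucket aggregation: one pass builds a frequency table keyed by (position mod 40, value)
--     # (40 = lcm of the three pattern lengths); each pattern's score is then read off the
--     # 40 buckets, independent of len(answers).
--     buckets = {}
--     for i, a in enumerate(answers):
--         key = (i % 40, a)
--         buckets[key] = buckets.get(key, 0) + 1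
--     patterns = [[1, 2, 3, 4, 5],
--                 [2, 1, 2, 3, 2, 4, 2, 5],
--                 [3, 3, 1, 1, 2, 2, 4, 4, 5, 5]]
--     scores = [sum(buckets.get((j, p[j % len(p)]), 0) for j in range(40))
--               for p in patterns]
--     best = max(scores)
--     return [k + 1 for k, s in enumerate(scores) if s == best]
-- ===== Notes on version B (the rewrite author's own statement) =====
-- stated objective: alternative
-- what changed: B replaces A's per-element interleaved scan (growing supo lists plus a mutable counter array) by a hash-aggregation scheme: one pass builds a dict counting occurrences of (index mod 40, value) pairs (40 = lcm of the pattern lengths), and each pattern's score is then computed purely from the 40 residue buckets, never rescanning answers; the argmaxes are read off the score list.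
import Mathlib
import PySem

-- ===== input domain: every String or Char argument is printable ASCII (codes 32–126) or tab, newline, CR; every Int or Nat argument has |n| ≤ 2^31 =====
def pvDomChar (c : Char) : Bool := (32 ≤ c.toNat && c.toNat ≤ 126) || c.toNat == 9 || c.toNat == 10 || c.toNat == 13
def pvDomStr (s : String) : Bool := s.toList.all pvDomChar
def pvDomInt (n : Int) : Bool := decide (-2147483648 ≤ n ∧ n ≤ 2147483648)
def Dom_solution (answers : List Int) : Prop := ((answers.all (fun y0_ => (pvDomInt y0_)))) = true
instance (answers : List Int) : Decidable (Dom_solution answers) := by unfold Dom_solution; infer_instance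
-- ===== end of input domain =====

-- B replaces A's interleaved scan (growing supo lists + counter array) by a hash-aggregation
-- scheme: a dict counts (index mod 40, value) pairs, and each pattern's score is read off the
-- 40 residue buckets (alternative decomposition, same asymptotic cost).

-- ===== PORT A =====
-- literal transliteration of A: one loop over range(len(answers)) carrying the three
-- growing supoK lists and the cnt array, then a loop over range(len(cnt)) building ans.
def solution (answers : List Int) : List Int :=
  let ans : List Int := []
  let cnt : List Int := [0, 0, 0]
  let tmp1 : List Int := (PySem.List.pyRange 1 6 1).map (fun i => i)
  let tmp2 : List Int := [2, 1, 2, 3, 2, 4, 2, 5]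
  let tmp3 : List Int := [3, 3, 1, 1, 2, 2, 4, 4, 5, 5]
  let st :=
    (PySem.List.pyRange 0 (answers.length : Int) 1).foldl
      (fun (st : List Int × List Int × List Int × List Int) i =>
        let supo1 := st.1 ++ [PySem.List.pyGetD tmp1 (PySem.Int.mod i 5) 0]
        let supo2 := st.2.1 ++ [PySem.List.pyGetD tmp2 (PySem.Int.mod i 8) 0]
        let supo3 := st.2.2.1 ++ [PySem.List.pyGetD tmp3 (PySem.Int.mod i 10) 0]
        let cnt := st.2.2.2
        let cnt := if PySem.List.pyGetD supo1 i 0 = PySem.List.pyGetD answers i 0 then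
            PySem.List.pySetD cnt 0 (PySem.List.pyGetD cnt 0 0 + 1) else cnt
        let cnt := if PySem.List.pyGetD supo2 i 0 = PySem.List.pyGetD answers i 0 then
            PySem.List.pySetD cnt 1 (PySem.List.pyGetD cnt 1 0 + 1) else cnt
        let cnt := if PySem.List.pyGetD supo3 i 0 = PySem.List.pyGetD answers i 0 then
            PySem.List.pySetD cnt 2 (PySem.List.pyGetD cnt 2 0 + 1) else cnt
        (supo1, supo2, supo3, cnt))
      (([] : List Int), ([] : List Int), ([] : List Int), cnt)
  let cnt := st.2.2.2
  (PySem.List.pyRange 0 (cnt.length : Int) 1).foldl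
    (fun ans i =>
      if PySem.List.pyGetD cnt i 0 = (PySem.List.max? cnt (fun x => x)).getD 0 then
        ans ++ [i + 1] else ans)
    ans

-- ===== PORT B =====
-- buckets[(i % 40, a)] += 1 over enumerate(answers); then per pattern
-- sum(buckets.get((j, p[j % len(p)]), 0) for j in range(40)); then the argmax comprehension.
def solution_alt (answers : List Int) : List Int :=
  let buckets :=
    (PySem.List.enumerate answers).foldl
      (fun (d : PySem.Dict (Int × Int) Int) ia =>
        let key := (PySem.Int.mod ia.1 40, ia.2)
        d.insert key (d.getD key 0 + 1))
      PySem.Dict.empty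
  let patterns : List (List Int) :=
    [[1, 2, 3, 4, 5], [2, 1, 2, 3, 2, 4, 2, 5], [3, 3, 1, 1, 2, 2, 4, 4, 5, 5]]
  let scores := patterns.map (fun p =>
    (PySem.List.pyRange 0 40 1).foldl
      (fun acc j =>
        acc + buckets.getD (j, PySem.List.pyGetD p (PySem.Int.mod j (p.length : Int)) 0) 0)
      0)
  let best := (PySem.List.max? scores (fun x => x)).getD 0
  (PySem.List.enumerate scores).foldl
    (fun acc is => if is.2 = best then acc ++ [is.1 + 1] else acc) []

-- ===== PRECONDITION & SPEC =====
def Spec_solution (answers : List Int) (out : List Int) : Prop := out = solution_alt answers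
instance (answers : List Int) (out : List Int) : Decidable (Spec_solution answers out) := by unfold Spec_solution; infer_instance

-- ===== CLAIM (what is proved, stated in full; the proofs are below) =====
def Claim_equal_solution : Prop := ∀ (answers : List Int), Dom_solution answers → Spec_solution answers (solution answers)

-- ===== LEMMAS AND PROOFS =====
-- cnt[k] after A's loop = number of matches of pattern t against xs (proof-side notion).
def pvScore (p : List Int) (answers : List Int) : Int :=
  (PySem.List.enumerate answers).foldl
    (fun acc ia =>
      if PySem.List.pyGetD p (PySem.Int.mod ia.1 (p.length : Int)) 0 = ia.2 then acc + 1 else acc)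
    0

theorem pvScore_append (p : List Int) (xs : List Int) (x : Int) :
    pvScore p (xs ++ [x]) =
      if PySem.List.pyGetD p (PySem.Int.mod (xs.length : Int) (p.length : Int)) 0 = x
      then pvScore p xs + 1 else pvScore p xs := by
  unfold pvScore
  rw [PySem.List.enumerate_append, List.foldl_append]
  simp [PySem.List.enumerate_cons, PySem.List.enumerate_nil]

theorem pvGetD_append_len (m : List Int) (v : Int) (n : Nat) (h : m.length = n) :
    PySem.List.pyGetD (m ++ [v]) (n : Int) 0 = v := by
  subst h; simp [List.getD]

theorem pvLoopA (t1 t2 t3 : List Int) (h1 : t1.length = 5) (h2 : t2.length = 8)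
    (h3 : t3.length = 10) (xs : List Int) :
    (PySem.List.pyRange 0 (xs.length : Int) 1).foldl
      (fun (st : List Int × List Int × List Int × List Int) i =>
        let supo1 := st.1 ++ [PySem.List.pyGetD t1 (PySem.Int.mod i 5) 0]
        let supo2 := st.2.1 ++ [PySem.List.pyGetD t2 (PySem.Int.mod i 8) 0]
        let supo3 := st.2.2.1 ++ [PySem.List.pyGetD t3 (PySem.Int.mod i 10) 0]
        let cnt := st.2.2.2
        let cnt := if PySem.List.pyGetD supo1 i 0 = PySem.List.pyGetD xs i 0 then
            PySem.List.pySetD cnt 0 (PySem.List.pyGetD cnt 0 0 + 1) else cnt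
        let cnt := if PySem.List.pyGetD supo2 i 0 = PySem.List.pyGetD xs i 0 then
            PySem.List.pySetD cnt 1 (PySem.List.pyGetD cnt 1 0 + 1) else cnt
        let cnt := if PySem.List.pyGetD supo3 i 0 = PySem.List.pyGetD xs i 0 then
            PySem.List.pySetD cnt 2 (PySem.List.pyGetD cnt 2 0 + 1) else cnt
        (supo1, supo2, supo3, cnt))
      (([] : List Int), ([] : List Int), ([] : List Int), ([0, 0, 0] : List Int))
    = ((PySem.List.pyRange 0 (xs.length : Int) 1).map (fun i => PySem.List.pyGetD t1 (PySem.Int.mod i 5) 0),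
       (PySem.List.pyRange 0 (xs.length : Int) 1).map (fun i => PySem.List.pyGetD t2 (PySem.Int.mod i 8) 0),
       (PySem.List.pyRange 0 (xs.length : Int) 1).map (fun i => PySem.List.pyGetD t3 (PySem.Int.mod i 10) 0),
       [pvScore t1 xs, pvScore t2 xs, pvScore t3 xs]) := by
  induction xs using List.reverseRecOn with
  | nil => simp [PySem.List.pyRange_one_eq_nil, pvScore, PySem.List.enumerate_nil]
  | append_singleton ys x ih =>
    have hn : (((ys ++ [x]).length : Int)) = (ys.length : Int) + 1 := by simp
    rw [hn, PySem.List.pyRange_one_succ_right (by positivity), List.foldl_append,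
        List.map_append, List.map_append, List.map_append]
    have hget : ∀ (i : Int), i ∈ PySem.List.pyRange 0 (ys.length : Int) 1 →
        PySem.List.pyGetD (ys ++ [x]) i 0 = PySem.List.pyGetD ys i 0 := by
      intro i hi
      rw [PySem.List.mem_pyRange_one] at hi
      obtain ⟨k, rfl⟩ := Int.eq_ofNat_of_zero_le hi.1
      have hk : k < ys.length := by exact_mod_cast hi.2
      simp [List.getD, List.getElem?_append_left hk]
    have h0 : (PySem.List.pyRange 0 (ys.length : Int) 1).foldl
        (fun (st : List Int × List Int × List Int × List Int) i =>
        let supo1 := st.1 ++ [PySem.List.pyGetD t1 (PySem.Int.mod i 5) 0]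
        let supo2 := st.2.1 ++ [PySem.List.pyGetD t2 (PySem.Int.mod i 8) 0]
        let supo3 := st.2.2.1 ++ [PySem.List.pyGetD t3 (PySem.Int.mod i 10) 0]
        let cnt := st.2.2.2
        let cnt := if PySem.List.pyGetD supo1 i 0 = PySem.List.pyGetD (ys ++ [x]) i 0 then
            PySem.List.pySetD cnt 0 (PySem.List.pyGetD cnt 0 0 + 1) else cnt
        let cnt := if PySem.List.pyGetD supo2 i 0 = PySem.List.pyGetD (ys ++ [x]) i 0 then
            PySem.List.pySetD cnt 1 (PySem.List.pyGetD cnt 1 0 + 1) else cnt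
        let cnt := if PySem.List.pyGetD supo3 i 0 = PySem.List.pyGetD (ys ++ [x]) i 0 then
            PySem.List.pySetD cnt 2 (PySem.List.pyGetD cnt 2 0 + 1) else cnt
        (supo1, supo2, supo3, cnt))
        (([] : List Int), ([] : List Int), ([] : List Int), ([0, 0, 0] : List Int))
      = (PySem.List.pyRange 0 (ys.length : Int) 1).foldl
        (fun (st : List Int × List Int × List Int × List Int) i =>
        let supo1 := st.1 ++ [PySem.List.pyGetD t1 (PySem.Int.mod i 5) 0]
        let supo2 := st.2.1 ++ [PySem.List.pyGetD t2 (PySem.Int.mod i 8) 0]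
        let supo3 := st.2.2.1 ++ [PySem.List.pyGetD t3 (PySem.Int.mod i 10) 0]
        let cnt := st.2.2.2
        let cnt := if PySem.List.pyGetD supo1 i 0 = PySem.List.pyGetD ys i 0 then
            PySem.List.pySetD cnt 0 (PySem.List.pyGetD cnt 0 0 + 1) else cnt
        let cnt := if PySem.List.pyGetD supo2 i 0 = PySem.List.pyGetD ys i 0 then
            PySem.List.pySetD cnt 1 (PySem.List.pyGetD cnt 1 0 + 1) else cnt
        let cnt := if PySem.List.pyGetD supo3 i 0 = PySem.List.pyGetD ys i 0 then
            PySem.List.pySetD cnt 2 (PySem.List.pyGetD cnt 2 0 + 1) else cnt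
        (supo1, supo2, supo3, cnt))
        (([] : List Int), ([] : List Int), ([] : List Int), ([0, 0, 0] : List Int)) :=
      PySem.List.foldl_congr_mem _ _ _ _ (by intro acc i hi; rw [hget i hi])
    rw [h0, ih]
    rw [pvScore_append t1, pvScore_append t2, pvScore_append t3, h1, h2, h3]
    simp only [List.foldl_cons, List.foldl_nil, List.map_cons, List.map_nil]
    rw [pvGetD_append_len _ _ ys.length (by simp),
        pvGetD_append_len _ _ ys.length (by simp),
        pvGetD_append_len _ _ ys.length (by simp),
        pvGetD_append_len _ _ ys.length (by simp)]
    norm_num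
    split_ifs <;> rfl

-- the keyed list whose multiset the bucket dict records
def pvKeyed (xs : List Int) : List (Int × Int) :=
  (PySem.List.enumerate xs).map (fun ia => (PySem.Int.mod ia.1 40, ia.2))

theorem pvBuckets_getD (xs : List Int) (q : Int × Int) :
    ((PySem.List.enumerate xs).foldl
      (fun (d : PySem.Dict (Int × Int) Int) ia =>
        d.insert (PySem.Int.mod ia.1 40, ia.2)
          (d.getD (PySem.Int.mod ia.1 40, ia.2) 0 + 1))
      PySem.Dict.empty).getD q 0 = ((pvKeyed xs).count q : Int) := by
  have h : ((PySem.List.enumerate xs).foldl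
      (fun (d : PySem.Dict (Int × Int) Int) ia =>
        d.insert (PySem.Int.mod ia.1 40, ia.2)
          (d.getD (PySem.Int.mod ia.1 40, ia.2) 0 + 1))
      PySem.Dict.empty)
    = (pvKeyed xs).foldl
        (fun (d : PySem.Dict (Int × Int) Int) k => d.insert k (d.getD k 0 + 1))
        PySem.Dict.empty := by
    unfold pvKeyed; rw [List.foldl_map]
  rw [h, PySem.Dict.getD_foldl_insert_add_one]
  simp [PySem.Dict.getD_empty]

theorem pvKeyed_append (ys : List Int) (x : Int) :
    pvKeyed (ys ++ [x]) = pvKeyed ys ++ [((PySem.Int.mod (ys.length : Int) 40), x)] := by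
  unfold pvKeyed
  rw [PySem.List.enumerate_append]
  simp [PySem.List.enumerate_cons, PySem.List.enumerate_nil]

theorem pvSum_zero_of_not_mem (L : List Int) (r x : Int) (f : Int → Int) (h : r ∉ L) :
    (L.map (fun j => if ((r, x) : Int × Int) = (j, f j) then (1 : Int) else 0)).sum = 0 := by
  induction L with
  | nil => simp
  | cons a L ih =>
    simp only [List.mem_cons, not_or] at h
    simp only [List.map_cons, List.sum_cons, ih h.2]
    rw [if_neg (by intro he; exact h.1 (congrArg Prod.fst he))]
    ring

theorem pvSum_indicator (L : List Int) (r x : Int) (f : Int → Int)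
    (hnd : L.Nodup) (hmem : r ∈ L) :
    (L.map (fun j => if ((r, x) : Int × Int) = (j, f j) then (1 : Int) else 0)).sum
      = if f r = x then 1 else 0 := by
  induction L with
  | nil => exact absurd hmem (List.not_mem_nil)
  | cons a L ih =>
    rcases List.mem_cons.mp hmem with h | h
    · subst h
      have hne : r ∉ L := (List.nodup_cons.mp hnd).1
      simp only [List.map_cons, List.sum_cons, pvSum_zero_of_not_mem L r x f hne]
      by_cases hc : f r = x
      · rw [if_pos (by rw [hc]), if_pos hc]; ring
      · rw [if_neg (by intro he; exact hc (congrArg Prod.snd he).symm), if_neg hc]; ring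
    · have ha : r ≠ a := by rintro rfl; exact (List.nodup_cons.mp hnd).1 h
      simp only [List.map_cons, List.sum_cons, ih (List.nodup_cons.mp hnd).2 h]
      rw [if_neg (by intro he; exact ha (congrArg Prod.fst he))]
      ring

theorem pvSum_map_add (L : List Int) (g h : Int → Int) :
    (L.map (fun j => g j + h j)).sum = (L.map g).sum + (L.map h).sum := by
  induction L with
  | nil => simp
  | cons a L ih => simp only [List.map_cons, List.sum_cons, ih]; ring

-- the B-side per-pattern score, read off the 40 buckets, equals pvScore.
theorem pvScoreB_eq (t : List Int) (m : Nat) (ht : t.length = m)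
    (hm : (m : Int) ∣ 40) (hmpos : 0 < (m : Int)) (xs : List Int) :
    (PySem.List.pyRange 0 40 1).foldl
      (fun acc j =>
        acc + ((pvKeyed xs).count (j, PySem.List.pyGetD t (PySem.Int.mod j (t.length : Int)) 0) : Int))
      0 = pvScore t xs := by
  rw [PySem.List.foldl_add]
  induction xs using List.reverseRecOn with
  | nil =>
    simp [pvKeyed, PySem.List.enumerate_nil, pvScore]
  | append_singleton ys x ih =>
    rw [pvKeyed_append, pvScore_append]
    set r : Int := PySem.Int.mod (ys.length : Int) 40 with hr
    have hmap : (PySem.List.pyRange 0 40 1).map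
        (fun j => ((pvKeyed ys ++ [(r, x)]).count
          (j, PySem.List.pyGetD t (PySem.Int.mod j (t.length : Int)) 0) : Int))
      = (PySem.List.pyRange 0 40 1).map
        (fun j => ((pvKeyed ys).count
            (j, PySem.List.pyGetD t (PySem.Int.mod j (t.length : Int)) 0) : Int)
          + (if ((r, x) : Int × Int)
              = (j, PySem.List.pyGetD t (PySem.Int.mod j (t.length : Int)) 0)
             then (1 : Int) else 0)) := by
      apply List.map_congr_left
      intro j _
      rw [List.count_append]
      simp only [List.count_singleton, beq_iff_eq]
      push_cast
      ring
    have hrmem : r ∈ PySem.List.pyRange 0 40 1 := by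
      rw [PySem.List.mem_pyRange_one]
      exact ⟨PySem.Int.mod_nonneg _ (by norm_num), PySem.Int.mod_lt _ (by norm_num)⟩
    have hnd : (PySem.List.pyRange 0 40 1).Nodup := PySem.List.nodup_pyRange_one 0 40
    have hfr : PySem.List.pyGetD t (PySem.Int.mod r (t.length : Int)) 0
        = PySem.List.pyGetD t (PySem.Int.mod (ys.length : Int) (t.length : Int)) 0 := by
      rw [hr, ht]
      rw [PySem.Int.mod_eq_emod_of_pos (by norm_num : (0:Int) < 40),
          PySem.Int.mod_eq_emod_of_pos hmpos, PySem.Int.mod_eq_emod_of_pos hmpos,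
          Int.emod_emod_of_dvd _ hm]
    rw [hmap, pvSum_map_add,
        pvSum_indicator (PySem.List.pyRange 0 40 1) r x
          (fun j => PySem.List.pyGetD t (PySem.Int.mod j (t.length : Int)) 0) hnd hrmem,
        hfr]
    rw [zero_add] at ih ⊢
    by_cases hc : PySem.List.pyGetD t (PySem.Int.mod (ys.length : Int) (t.length : Int)) 0 = x
    · rw [if_pos hc, if_pos hc, ih]
    · rw [if_neg hc, if_neg hc, ih]; ring

theorem pvFinal (c1 c2 c3 : Int) :
    (PySem.List.pyRange 0 (([c1, c2, c3] : List Int).length : Int) 1).foldl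
      (fun (ans : List Int) i =>
        if PySem.List.pyGetD [c1, c2, c3] i 0 =
            (PySem.List.max? [c1, c2, c3] (fun x => x)).getD 0 then ans ++ [i + 1] else ans)
      []
    = (PySem.List.enumerate [c1, c2, c3]).foldl
        (fun acc (is : Int × Int) =>
          if is.2 = (PySem.List.max? [c1, c2, c3] (fun x => x)).getD 0 then
            acc ++ [is.1 + 1] else acc)
        [] := by
  rw [show (([c1, c2, c3] : List Int).length : Int) = 3 from by simp,
      show PySem.List.pyRange 0 3 1 = [0, 1, 2] from by decide]
  norm_num [PySem.List.enumerate_cons, PySem.List.enumerate_nil]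
  rw [show PySem.List.pyGetD [c1, c2, c3] (1 : Int) 0 = c2 from rfl,
      show PySem.List.pyGetD [c1, c2, c3] (2 : Int) 0 = c3 from rfl]

-- ===== VERDICT (by name: the statement is the Claim_ definition above) =====
theorem solution_spec : Claim_equal_solution := by
  intro answers _
  simp only [Spec_solution, solution, solution_alt]
  rw [show (PySem.List.pyRange 1 6 1).map (fun i => (i : Int)) = ([1, 2, 3, 4, 5] : List Int) from by decide]
  rw [pvLoopA [1, 2, 3, 4, 5] [2, 1, 2, 3, 2, 4, 2, 5] [3, 3, 1, 1, 2, 2, 4, 4, 5, 5]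
        rfl rfl rfl answers]
  simp only [List.map_cons, List.map_nil]
  have hB : ∀ (p : List Int),
      (PySem.List.pyRange 0 40 1).foldl
        (fun acc j => acc +
          ((PySem.List.enumerate answers).foldl
            (fun (d : PySem.Dict (Int × Int) Int) ia =>
              d.insert (PySem.Int.mod ia.1 40, ia.2)
                (d.getD (PySem.Int.mod ia.1 40, ia.2) 0 + 1))
            PySem.Dict.empty).getD
            (j, PySem.List.pyGetD p (PySem.Int.mod j (p.length : Int)) 0) 0)
        0
    = (PySem.List.pyRange 0 40 1).foldl
        (fun acc j => acc +
          ((pvKeyed answers).count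
            (j, PySem.List.pyGetD p (PySem.Int.mod j (p.length : Int)) 0) : Int))
        0 := by
    intro p
    apply PySem.List.foldl_congr_mem
    intro acc j _
    rw [pvBuckets_getD]
  have h1 := pvScoreB_eq [1,2,3,4,5] 5 rfl (by norm_num) (by norm_num) answers
  have h2 := pvScoreB_eq [2,1,2,3,2,4,2,5] 8 rfl (by norm_num) (by norm_num) answers
  have h3 := pvScoreB_eq [3,3,1,1,2,2,4,4,5,5] 10 rfl (by norm_num) (by norm_num) answers
  simp only [hB, h1, h2, h3]
  exact pvFinal (pvScore [1,2,3,4,5] answers) (pvScore [2,1,2,3,2,4,2,5] answers)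
    (pvScore [3,3,1,1,2,2,4,4,5,5] answers)
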